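-- pv_equiv track=rewrite | github.com/Varnook/8-bit_toy_pc-logisim- | microcoder.py | separarDirecc
-- ===== SOURCE A (Python) =====
-- def separarDirecc(texto):           # Una vez que se encuentra se va para atrás hasta el último '\n' (enter) y se separa ese
--     resultado = []                  # pedazo de string de el resto. Ese resto se determina encontrando, delante de ':' hasta
--     tamT = len(texto)               # encontrar los próximos ':' y de ahí retroceder un poco hasta el '\n'.
--     iter_texto = 0                  # La función ignora todo el texto hasta encontrar los primeros ':', por eso se agregan en
--                                     # borrarComentarios. La alternativa eran muchas lineas de código más.
--     while iter_texto < tamT: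
--
--         if texto[iter_texto] == ':':
--
--             dir_micro = iter_texto
--             while dir_micro > 0 and texto[dir_micro] != '\n': dir_micro -= 1
--
--             if dir_micro:
--                 resultado.append(texto[dir_micro:iter_texto])
--             else:
--                 resultado.append(texto[0:iter_texto])
--
--             iter_texto += 1
--             ini_micro = iter_texto
--             while iter_texto < tamT and texto[iter_texto] != ':' and texto[iter_texto] != '': iter_texto += 1
--
--             if iter_texto < tamT and texto[iter_texto]:
--                 fin_micro = iter_texto
--                 while fin_micro > 0 and texto[fin_micro] != '\n': fin_micro -= 1
--                 resultado.append(texto[ini_micro:fin_micro])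
--             else:
--                 resultado.append(texto[ini_micro:iter_texto])
--
--         else:
--             iter_texto += 1
--
--     return resultado
-- ===== SOURCE B (Python) =====
-- def separarDirecc(texto):
--     # One forward pass: track the index of the last '\n' seen (0 if none),
--     # emit the label chunk at each ':' and the pending micro chunk when the
--     # next ':' (or end of text) is reached.
--     resultado = []
--     last_nl = 0
--     pending = None
--     for i, c in enumerate(texto):
--         if c == '\n':
--             last_nl = i
--         if c == ':':
--             if pending is not None:
--                 resultado.append(texto[pending:last_nl])
--             resultado.append(texto[last_nl:i])
--             pending = i + 1
--     if pending is not None: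
--         resultado.append(texto[pending:])
--     return resultado
-- ===== Notes on version B (the rewrite author's own statement) =====
-- stated objective: faster
-- what changed: Replaced the quadratic rescans (backward walk to the previous newline at every ':' plus re-processing each found ':') by a single forward pass that maintains the last-newline index and a pending chunk start, so each character is visited once.
import Mathlib
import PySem

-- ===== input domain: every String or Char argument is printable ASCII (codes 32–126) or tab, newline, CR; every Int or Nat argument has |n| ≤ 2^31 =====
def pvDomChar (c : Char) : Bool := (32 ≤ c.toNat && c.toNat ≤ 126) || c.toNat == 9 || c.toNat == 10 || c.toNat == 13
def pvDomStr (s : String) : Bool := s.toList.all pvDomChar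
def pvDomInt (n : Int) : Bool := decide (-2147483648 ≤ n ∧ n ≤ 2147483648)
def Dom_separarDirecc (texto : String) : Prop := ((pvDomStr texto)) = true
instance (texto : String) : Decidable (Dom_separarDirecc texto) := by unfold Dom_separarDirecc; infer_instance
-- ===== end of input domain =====

-- B replaces A's quadratic backward/forward rescans by one forward pass (faster, asymptotic).

-- texto[a:b] for 0 ≤ a, b: exact hand port of a Python slice with nonnegative indices
def pvSlice (l : List Char) (a b : Nat) : String := String.mk ((l.drop a).take (b - a))

-- ===== PORT A =====
-- `while dir_micro > 0 and texto[dir_micro] != '\n': dir_micro -= 1`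
def backNL (l : List Char) (j : Nat) : Nat :=
  if 0 < j ∧ l.getD j ' ' ≠ '\n' then backNL l (j - 1) else j
termination_by j
decreasing_by omega

-- `while iter_texto < tamT and texto[iter_texto] != ':' and texto[iter_texto] != '': iter_texto += 1`
-- (a one-character string is never '', so that last test is never true)
def fwdColon (l : List Char) (i : Nat) : Nat :=
  if i < l.length ∧ l.getD i ' ' ≠ ':' then fwdColon l (i + 1) else i
termination_by l.length - i
decreasing_by omega

theorem fwdColon_ge (l : List Char) (i : Nat) : i ≤ fwdColon l i := by
  unfold fwdColon
  split
  · have := fwdColon_ge l (i + 1); omega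
  · omega
termination_by l.length - i
decreasing_by omega

-- the outer `while iter_texto < tamT:` loop of A
def loopA (l : List Char) (res : List String) (i : Nat) : List String :=
  if hi : i < l.length then
    if l.getD i ' ' = ':' then
      -- backward walk to the last '\n'
      let d := backNL l i
      -- `if dir_micro: append(texto[dir_micro:iter_texto]) else: append(texto[0:iter_texto])`
      let res1 := if d ≠ 0 then res ++ [pvSlice l d i] else res ++ [pvSlice l 0 i]
      let ini := i + 1
      let j := fwdColon l ini
      -- `if iter_texto < tamT and texto[iter_texto]:` (a found char is always truthy)
      if j < l.length then
        let f := backNL l j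
        loopA l (res1 ++ [pvSlice l ini f]) j
      else
        loopA l (res1 ++ [pvSlice l ini j]) j
    else
      loopA l res (i + 1)
  else res
termination_by l.length - i
decreasing_by
  · have := fwdColon_ge l (i + 1); omega
  · have := fwdColon_ge l (i + 1); omega
  · omega

def separarDirecc (texto : String) : List String := loopA texto.toList [] 0

-- ===== PORT B =====
-- the single `for i, c in enumerate(texto):` pass of B, plus the trailing flush
def loopB (l : List Char) (i lastnl : Nat) (pending : Option Nat) (res : List String) :
    List String :=
  if hi : i < l.length then
    let c := l.getD i ' '
    let lastnl' := if c = '\n' then i else lastnl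
    if c = ':' then
      let res1 :=
        match pending with
        | some p => res ++ [pvSlice l p lastnl']
        | none => res
      loopB l (i + 1) lastnl' (some (i + 1)) (res1 ++ [pvSlice l lastnl' i])
    else
      loopB l (i + 1) lastnl' pending res
  else
    match pending with
    | some p => res ++ [pvSlice l p l.length]
    | none => res
termination_by l.length - i
decreasing_by all_goals omega

def separarDirecc_alt (texto : String) : List String := loopB texto.toList 0 0 none []

-- ===== PRECONDITION & SPEC =====
def Spec_separarDirecc (texto : String) (out : List String) : Prop := out = separarDirecc_alt texto
instance (texto : String) (out : List String) : Decidable (Spec_separarDirecc texto out) := by unfold Spec_separarDirecc; infer_instance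

-- ===== CLAIM (what is proved, stated in full; the proofs are below) =====
def Claim_equal_separarDirecc : Prop := ∀ (texto : String), Dom_separarDirecc texto → Spec_separarDirecc texto (separarDirecc texto)

-- ===== LEMMAS AND PROOFS =====

-- index of the last '\n' strictly before position i (0 if none): B's running `last_nl`
def nlIdx (l : List Char) : Nat → Nat
  | 0 => 0
  | i + 1 => if l.getD i ' ' = '\n' then i else nlIdx l i

theorem nlIdx_succ (l : List Char) (i : Nat) :
    nlIdx l (i + 1) = if l.getD i ' ' = '\n' then i else nlIdx l i := rfl

theorem backNL_eq_nlIdx (l : List Char) (i : Nat) (h : l.getD i ' ' ≠ '\n') :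
    backNL l i = nlIdx l i := by
  induction i with
  | zero => rw [backNL]; simp [nlIdx]
  | succ n ih =>
    rw [backNL, if_pos ⟨Nat.succ_pos n, h⟩, Nat.add_sub_cancel, nlIdx_succ]
    by_cases hnl : l.getD n ' ' = '\n'
    · rw [if_pos hnl, backNL, if_neg (fun hh => hh.2 hnl)]
    · rw [if_neg hnl]; exact ih hnl

theorem fwdColon_stop (l : List Char) (i : Nat) (h : ¬(i < l.length ∧ l.getD i ' ' ≠ ':')) :
    fwdColon l i = i := by rw [fwdColon, if_neg h]

theorem fwdColon_step (l : List Char) (i : Nat) (h1 : i < l.length) (h2 : l.getD i ' ' ≠ ':') :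
    fwdColon l i = fwdColon l (i + 1) := by rw [fwdColon, if_pos ⟨h1, h2⟩]

theorem fwdColon_le (l : List Char) (i : Nat) (h : i ≤ l.length) :
    fwdColon l i ≤ l.length := by
  unfold fwdColon
  split
  · exact fwdColon_le l (i + 1) (by omega)
  · exact h
termination_by l.length - i
decreasing_by omega

-- step-equations for the two loop ports
theorem loopA_exit (l : List Char) (res : List String) (i : Nat) (h : ¬ i < l.length) :
    loopA l res i = res := by rw [loopA, dif_neg h]

theorem loopA_skip (l : List Char) (res : List String) (i : Nat) (h1 : i < l.length)
    (h2 : l.getD i ' ' ≠ ':') : loopA l res i = loopA l res (i + 1) := by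
  rw [loopA, dif_pos h1, if_neg h2]

theorem loopA_colon (l : List Char) (res : List String) (i : Nat) (h1 : i < l.length)
    (h2 : l.getD i ' ' = ':') :
    loopA l res i =
      if fwdColon l (i + 1) < l.length then
        loopA l ((if backNL l i ≠ 0 then res ++ [pvSlice l (backNL l i) i]
            else res ++ [pvSlice l 0 i]) ++
          [pvSlice l (i + 1) (backNL l (fwdColon l (i + 1)))]) (fwdColon l (i + 1))
      else
        loopA l ((if backNL l i ≠ 0 then res ++ [pvSlice l (backNL l i) i]
            else res ++ [pvSlice l 0 i]) ++
          [pvSlice l (i + 1) (fwdColon l (i + 1))]) (fwdColon l (i + 1)) := by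
  rw [loopA, dif_pos h1, if_pos h2]

theorem loopB_exit_some (l : List Char) (i lastnl p : Nat) (res : List String)
    (h : ¬ i < l.length) :
    loopB l i lastnl (some p) res = res ++ [pvSlice l p l.length] := by
  rw [loopB, dif_neg h]

theorem loopB_exit_none (l : List Char) (i lastnl : Nat) (res : List String)
    (h : ¬ i < l.length) : loopB l i lastnl none res = res := by rw [loopB, dif_neg h]

theorem loopB_skip (l : List Char) (i lastnl : Nat) (pending : Option Nat) (res : List String)
    (h1 : i < l.length) (h2 : l.getD i ' ' ≠ ':') :
    loopB l i lastnl pending res =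
      loopB l (i + 1) (if l.getD i ' ' = '\n' then i else lastnl) pending res := by
  conv_lhs => rw [loopB.eq_def]
  rw [dif_pos h1]
  simp only [h2, if_false]

theorem loopB_colon_some (l : List Char) (i lastnl p : Nat) (res : List String)
    (h1 : i < l.length) (h2 : l.getD i ' ' = ':') :
    loopB l i lastnl (some p) res =
      loopB l (i + 1) lastnl (some (i + 1))
        ((res ++ [pvSlice l p lastnl]) ++ [pvSlice l lastnl i]) := by
  conv_lhs => rw [loopB.eq_def]
  rw [dif_pos h1]
  simp only [h2]
  simp

theorem loopB_colon_none (l : List Char) (i lastnl : Nat) (res : List String)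
    (h1 : i < l.length) (h2 : l.getD i ' ' = ':') :
    loopB l i lastnl none res =
      loopB l (i + 1) lastnl (some (i + 1)) (res ++ [pvSlice l lastnl i]) := by
  conv_lhs => rw [loopB.eq_def]
  rw [dif_pos h1]
  simp only [h2]
  simp

-- main invariant, pending side: from position i with B's pending chunk open at p,
-- B's pass agrees with A resumed at the next ':' (or flushes at end of text)
theorem loopB_pending (l : List Char) (i : Nat) (hi : i ≤ l.length) (p : Nat)
    (res : List String) :
    loopB l i (nlIdx l i) (some p) res =
      (if fwdColon l i < l.length then
        loopA l (res ++ [pvSlice l p (backNL l (fwdColon l i))]) (fwdColon l i)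
      else res ++ [pvSlice l p l.length]) := by
  by_cases hlt : i < l.length
  · by_cases hc : l.getD i ' ' = ':'
    · have hnn : l.getD i ' ' ≠ '\n' := by rw [hc]; decide
      have hfwd : fwdColon l i = i := fwdColon_stop l i (fun h => h.2 hc)
      have hb : backNL l i = nlIdx l i := backNL_eq_nlIdx l i hnn
      have hstep : nlIdx l (i + 1) = nlIdx l i := by rw [nlIdx_succ, if_neg hnn]
      rw [hfwd, if_pos hlt, hb, loopB_colon_some l i _ p res hlt hc,
        loopA_colon l _ i hlt hc, hb]
      have hlabel : (if nlIdx l i ≠ 0 then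
            (res ++ [pvSlice l p (nlIdx l i)]) ++ [pvSlice l (nlIdx l i) i]
          else (res ++ [pvSlice l p (nlIdx l i)]) ++ [pvSlice l 0 i]) =
          (res ++ [pvSlice l p (nlIdx l i)]) ++ [pvSlice l (nlIdx l i) i] := by
        by_cases h0 : nlIdx l i = 0
        · rw [if_neg (by simp [h0]), h0]
        · rw [if_pos h0]
      rw [hlabel]
      have ih := loopB_pending l (i + 1) (by omega) (i + 1)
        ((res ++ [pvSlice l p (nlIdx l i)]) ++ [pvSlice l (nlIdx l i) i])
      rw [hstep] at ih
      rw [ih]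
      by_cases hj : fwdColon l (i + 1) < l.length
      · rw [if_pos hj, if_pos hj]
      · have hjl : fwdColon l (i + 1) = l.length := by
          have := fwdColon_le l (i + 1) (by omega); omega
        rw [if_neg hj, if_neg hj, hjl, loopA_exit l _ l.length (by omega)]
    · have hfwd : fwdColon l i = fwdColon l (i + 1) := fwdColon_step l i hlt hc
      have ih := loopB_pending l (i + 1) (by omega) p res
      rw [loopB_skip l i _ (some p) res hlt hc, ← nlIdx_succ, ih, hfwd]
  · have hil : i = l.length := by omega
    have hfwd : fwdColon l i = i := fwdColon_stop l i (by omega)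
    rw [loopB_exit_some l i _ p res hlt, hfwd, if_neg hlt]
termination_by l.length - i
decreasing_by all_goals omega

-- main invariant, no pending chunk: B's pass equals A's outer loop
theorem loopB_none (l : List Char) (i : Nat) (_hi : i ≤ l.length) (res : List String) :
    loopB l i (nlIdx l i) none res = loopA l res i := by
  by_cases hlt : i < l.length
  · by_cases hc : l.getD i ' ' = ':'
    · have hnn : l.getD i ' ' ≠ '\n' := by rw [hc]; decide
      have hb : backNL l i = nlIdx l i := backNL_eq_nlIdx l i hnn
      have hstep : nlIdx l (i + 1) = nlIdx l i := by rw [nlIdx_succ, if_neg hnn]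
      rw [loopB_colon_none l i _ res hlt hc]
      have hp := loopB_pending l (i + 1) (by omega) (i + 1)
        (res ++ [pvSlice l (nlIdx l i) i])
      rw [hstep] at hp
      rw [hp, loopA_colon l res i hlt hc, hb]
      have hlabel : (if nlIdx l i ≠ 0 then res ++ [pvSlice l (nlIdx l i) i]
          else res ++ [pvSlice l 0 i]) = res ++ [pvSlice l (nlIdx l i) i] := by
        by_cases h0 : nlIdx l i = 0
        · rw [if_neg (by simp [h0]), h0]
        · rw [if_pos h0]
      rw [hlabel]
      by_cases hj : fwdColon l (i + 1) < l.length
      · rw [if_pos hj, if_pos hj]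
      · have hjl : fwdColon l (i + 1) = l.length := by
          have := fwdColon_le l (i + 1) (by omega); omega
        rw [if_neg hj, if_neg hj, hjl, loopA_exit l _ l.length (by omega)]
    · have ih := loopB_none l (i + 1) (by omega) res
      rw [loopB_skip l i _ none res hlt hc, ← nlIdx_succ, ih,
        loopA_skip l res i hlt hc]
  · rw [loopB_exit_none l i _ res hlt, loopA_exit l res i hlt]
termination_by l.length - i
decreasing_by all_goals omega

-- ===== VERDICT (by name: the statement is the Claim_ definition above) =====
theorem separarDirecc_spec : Claim_equal_separarDirecc := by
  intro texto _
  unfold Spec_separarDirecc separarDirecc separarDirecc_alt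
  have h := loopB_none texto.toList 0 (by omega) []
  simpa [nlIdx] using h.symm
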